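-- pv_equiv track=rewrite | github.com/cutajarj/CodilityInPython | solutions/dynamicprogramming/number_solitaire.py | max_sum_six_distancesMem
-- ===== SOURCE A (Python) =====
-- def max_sum_six_distancesMem(a, position, values):
--     if position == len(a) - 1:
--         return a[position]
--     if values[position] == -100000:
--         max_forward = min(len(a) - position, 6)
--         current_max = -100000
--         for i in range(1, max_forward):
--             local_max = max_sum_six_distancesMem(a, position + i, values)
--             current_max = max(current_max, local_max)
--         values[position] = current_max + a[position]
--     return values[position]
-- ===== SOURCE B (Python) =====
-- # Bottom-up iterative re-implementation (no recursion); equivalence is about the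
-- # return value: B fills every sentinel memo slot in [position, len-2] while A only
-- # fills the slots its recursion reaches.
-- def max_sum_six_distancesMem(a, position, values):
--     if position == len(a) - 1:
--         return a[position]
--     for i in range(len(a) - 2, position - 1, -1):
--         if values[i] == -100000:
--             current = -100000
--             for j in range(1, min(len(a) - i, 6)):
--                 nb = a[i + j] if i + j == len(a) - 1 else values[i + j]
--                 current = max(current, nb)
--             values[i] = current + a[i]
--     return values[position]
-- ===== Notes on version B (the rewrite author's own statement) =====
-- stated objective: alternative
-- what changed: A's top-down memoized recursion is replaced by a single bottom-up loop from len(a)-2 down to position that fills each sentinel memo slot once from the at-most-5 slots above it (same O(n) cost, no recursion and no call-frame state).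
-- outside the precondition, e.g. on max_sum_six_distancesMem([2, -1], -2, [-100000, -100000]): A returns 3, B returns 1; on max_sum_six_distancesMem([1, 2, 3], 0, [5]): A returns 5, B raises IndexError
import Mathlib
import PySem

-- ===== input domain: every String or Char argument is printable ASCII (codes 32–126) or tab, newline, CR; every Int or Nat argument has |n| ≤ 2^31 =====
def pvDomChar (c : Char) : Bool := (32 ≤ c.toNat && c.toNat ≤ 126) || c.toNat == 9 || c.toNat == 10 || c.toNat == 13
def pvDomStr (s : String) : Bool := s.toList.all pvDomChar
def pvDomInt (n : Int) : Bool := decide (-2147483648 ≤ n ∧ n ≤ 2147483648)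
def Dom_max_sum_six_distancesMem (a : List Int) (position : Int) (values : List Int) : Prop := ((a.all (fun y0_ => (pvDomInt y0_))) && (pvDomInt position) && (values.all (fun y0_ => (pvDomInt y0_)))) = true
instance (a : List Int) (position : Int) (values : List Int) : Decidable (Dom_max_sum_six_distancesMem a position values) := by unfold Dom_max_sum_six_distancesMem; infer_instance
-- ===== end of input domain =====

-- B replaces A's memoized recursion by a single bottom-up loop (same return value;
-- A mutates `values` in place and so does B, though B may fill memo slots A's
-- recursion never reaches — the equivalence proved here is about the RETURN value).

-- ===== PORT A =====
-- A is recursive and mutates `values`; the port threads the list through a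
-- fuel-bounded helper (fuel only makes the recursion total; the chosen fuel always suffices
-- for a run of the Python that returns: the position grows by ≥ 1 per nested call).
def msDistMem (a : List Int) : Nat → Int → List Int → Int × List Int
  | 0, _, values => (0, values)
  | fuel + 1, position, values =>
    if position = (a.length : Int) - 1 then
      (PySem.List.pyGetD a position 0, values)
    else if PySem.List.pyGetD values position 0 = -100000 then
      let st := (PySem.List.pyRange 1 (min ((a.length : Int) - position) 6) 1).foldl
        (fun st i => (max st.1 (msDistMem a fuel (position + i) st.2).1,
                      (msDistMem a fuel (position + i) st.2).2))
        (-100000, values)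
      let values' := PySem.List.pySetD st.2 position (st.1 + PySem.List.pyGetD a position 0)
      (PySem.List.pyGetD values' position 0, values')
    else (PySem.List.pyGetD values position 0, values)

def max_sum_six_distancesMem (a : List Int) (position : Int) (values : List Int) : Int :=
  (msDistMem a (a.length + values.length + 2) position values).1

-- ===== PORT B =====
-- loop body of B's bottom-up pass (`for i in range(len(a)-2, position-1, -1)`)
def stepB (a : List Int) (v : List Int) (i : Int) : List Int :=
  if PySem.List.pyGetD v i 0 = -100000 then
    let current := (PySem.List.pyRange 1 (min ((a.length : Int) - i) 6) 1).foldl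
      (fun c j => max c (if i + j = (a.length : Int) - 1 then PySem.List.pyGetD a (i + j) 0
                         else PySem.List.pyGetD v (i + j) 0)) (-100000)
    PySem.List.pySetD v i (current + PySem.List.pyGetD a i 0)
  else v

def max_sum_six_distancesMem_alt (a : List Int) (position : Int) (values : List Int) : Int :=
  if position = (a.length : Int) - 1 then PySem.List.pyGetD a position 0
  else
    PySem.List.pyGetD
      ((PySem.List.pyRange ((a.length : Int) - 2) (position - 1) (-1)).foldl (stepB a) values)
      position 0

-- ===== PRECONDITION & SPEC =====
-- Pre_ restricts to the function's natural domain: 0 ≤ position < len(a) and (unless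
-- position is the last index, which reads nothing of `values`) len(values) ≥ len(a)-1.
-- Outside it A either raises IndexError or returns via Python's negative-index
-- wraparound / an accidental memo hit on a too-short list — behaviour no caller of
-- this Codility solution relies on (see claim cites).
def Pre_max_sum_six_distancesMem (a : List Int) (position : Int) (values : List Int) : Prop :=
  0 ≤ position ∧ position < (a.length : Int) ∧
    (position = (a.length : Int) - 1 ∨ (a.length : Int) - 1 ≤ (values.length : Int))
instance (a : List Int) (position : Int) (values : List Int) : Decidable (Pre_max_sum_six_distancesMem a position values) := by unfold Pre_max_sum_six_distancesMem; infer_instance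

def pvWitness_max_sum_six_distancesMem : List Int × Int × List Int :=
  ([1, -2, 4, 3], 0, [-100000, -100000, -100000, -100000])

def Spec_max_sum_six_distancesMem (a : List Int) (position : Int) (values : List Int) (out : Int) : Prop := out = max_sum_six_distancesMem_alt a position values
instance (a : List Int) (position : Int) (values : List Int) (out : Int) : Decidable (Spec_max_sum_six_distancesMem a position values out) := by unfold Spec_max_sum_six_distancesMem; infer_instance

-- ===== CLAIM (what is proved, stated in full; the proofs are below) =====
def Claim_equal_max_sum_six_distancesMem : Prop := ∀ (a : List Int) (position : Int) (values : List Int), Dom_max_sum_six_distancesMem a position values → Pre_max_sum_six_distancesMem a position values → Spec_max_sum_six_distancesMem a position values (max_sum_six_distancesMem a position values)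

-- ===== LEMMAS AND PROOFS =====

-- the common value: fSpec a v0 i is what both programs compute for index i
-- (a[i] at the last index, the pre-filled memo value where v0 has one, else the recurrence)
def fSpec (a v0 : List Int) (i : Int) : Int :=
  if _h : (a.length : Int) - 1 ≤ i then PySem.List.pyGetD a i 0
  else if PySem.List.pyGetD v0 i 0 ≠ -100000 then PySem.List.pyGetD v0 i 0
  else ((PySem.List.pyRange 1 (min ((a.length : Int) - i) 6) 1).attach.map
          (fun j => fSpec a v0 (i + j.1))).foldl max (-100000)
       + PySem.List.pyGetD a i 0
termination_by ((a.length : Int) - 1 - i).toNat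
decreasing_by
  have hj := (PySem.List.mem_pyRange_one).mp j.2
  omega

lemma pyGetD_pySetD_int (xs : List Int) (i k x : Int) (h0 : 0 ≤ i)
    (h1 : i < (xs.length : Int)) (hk : 0 ≤ k) :
    PySem.List.pyGetD (PySem.List.pySetD xs i x) k 0 =
      if k = i then x else PySem.List.pyGetD xs k 0 := by
  rw [PySem.List.pySetD_of_nonneg xs x h0]
  simp only [PySem.List.pyGetD, PySem.List.pyGet?_of_nonneg _ hk, List.getElem?_set]
  rcases eq_or_ne k i with rfl | hki
  · rw [if_pos rfl, if_pos (by omega), if_pos rfl]; rfl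
  · rw [if_neg (by omega), if_neg hki]

lemma foldl_attach_max (L : List Int) (g : Int → Int) (c : Int) :
    ((L.attach.map fun j => g j.1).foldl max c) = L.foldl (fun c i => max c (g i)) c := by
  rw [List.attach_map_val, List.foldl_map]

-- the invariant A's recursion maintains on the memo list
def InvA (a v0 v : List Int) : Prop :=
  v.length = v0.length ∧
  ∀ k : Int, 0 ≤ k → k < (v0.length : Int) →
    (PySem.List.pyGetD v0 k 0 ≠ -100000 → PySem.List.pyGetD v k 0 = PySem.List.pyGetD v0 k 0) ∧
    (PySem.List.pyGetD v0 k 0 = -100000 →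
      PySem.List.pyGetD v k 0 = -100000 ∨ PySem.List.pyGetD v k 0 = fSpec a v0 k)

lemma foldA (a v0 : List Int) (fuel : Nat)
    (IH : ∀ (p : Int) (v : List Int), 0 ≤ p → p < (a.length : Int) →
      ((a.length : Int) - 1 - p).toNat < fuel → InvA a v0 v →
      (msDistMem a fuel p v).1 = fSpec a v0 p ∧ InvA a v0 (msDistMem a fuel p v).2)
    (p : Int) (hp : 0 ≤ p) (hfuel : ((a.length : Int) - 1 - p).toNat ≤ fuel) :
    ∀ (L : List Int) (c : Int) (v : List Int),
      (∀ i ∈ L, 1 ≤ i ∧ p + i ≤ (a.length : Int) - 1) → InvA a v0 v →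
      (L.foldl (fun st i => (max st.1 (msDistMem a fuel (p + i) st.2).1,
          (msDistMem a fuel (p + i) st.2).2)) (c, v)).1
        = L.foldl (fun c i => max c (fSpec a v0 (p + i))) c
      ∧ InvA a v0 (L.foldl (fun st i => (max st.1 (msDistMem a fuel (p + i) st.2).1,
          (msDistMem a fuel (p + i) st.2).2)) (c, v)).2 := by
  intro L
  induction L with
  | nil => intro c v _ hv; exact ⟨rfl, hv⟩
  | cons x xs ihL =>
    intro c v hmem hv
    have hx := hmem x (List.mem_cons_self ..)
    have h1 := IH (p + x) v (by omega) (by omega) (by omega) hv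
    simp only [List.foldl_cons]
    rw [h1.1]
    exact ihL (max c (fSpec a v0 (p + x))) _
      (fun i hi => hmem i (List.mem_cons_of_mem _ hi)) h1.2

lemma msA (a v0 : List Int) (hlen : (a.length : Int) - 1 ≤ (v0.length : Int)) :
    ∀ (fuel : Nat) (p : Int) (v : List Int), 0 ≤ p → p < (a.length : Int) →
      ((a.length : Int) - 1 - p).toNat < fuel → InvA a v0 v →
      (msDistMem a fuel p v).1 = fSpec a v0 p ∧ InvA a v0 (msDistMem a fuel p v).2 := by
  intro fuel
  induction fuel with
  | zero => intro p v _ _ hfuel _; omega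
  | succ fuel ih =>
    intro p v hp0 hpn hfuel hv
    simp only [msDistMem]
    by_cases hlast : p = (a.length : Int) - 1
    · rw [if_pos hlast]
      exact ⟨by rw [fSpec, dif_pos (by omega)], hv⟩
    · rw [if_neg hlast]
      by_cases hsent : PySem.List.pyGetD v p 0 = -100000
      · rw [if_pos hsent]
        have hpl : p < (a.length : Int) - 1 := by omega
        have hv0p : PySem.List.pyGetD v0 p 0 = -100000 := by
          by_contra h
          exact h (((hv.2 p hp0 (by omega)).1 h) ▸ hsent)
        have hmem : ∀ i ∈ PySem.List.pyRange 1 (min ((a.length : Int) - p) 6) 1,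
            1 ≤ i ∧ p + i ≤ (a.length : Int) - 1 := by
          intro i hi
          have := PySem.List.mem_pyRange_one.mp hi
          omega
        have hfold := foldA a v0 fuel ih p hp0 (by omega)
          (PySem.List.pyRange 1 (min ((a.length : Int) - p) 6) 1) (-100000) v hmem hv
        set F := (PySem.List.pyRange 1 (min ((a.length : Int) - p) 6) 1).foldl
          (fun st i => (max st.1 (msDistMem a fuel (p + i) st.2).1,
            (msDistMem a fuel (p + i) st.2).2)) (-100000, v) with hF
        obtain ⟨hFl, hFinv⟩ := hfold.2
        have hFlen : p < ((F.2).length : Int) := by rw [hFl]; omega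
        have hX : F.1 + PySem.List.pyGetD a p 0 = fSpec a v0 p := by
          rw [hfold.1, fSpec, dif_neg (by omega), if_neg (not_not_intro hv0p),
            foldl_attach_max _ (fun z => fSpec a v0 (p + z))]
        constructor
        · rw [pyGetD_pySetD_int _ p p _ hp0 hFlen hp0, if_pos rfl]
          exact hX
        · refine ⟨by rw [PySem.List.length_pySetD, hFl], ?_⟩
          intro k hk0 hkl
          rw [pyGetD_pySetD_int _ p k _ hp0 hFlen hk0]
          rcases eq_or_ne k p with rfl | hkp
          · rw [if_pos rfl]
            exact ⟨fun h => absurd hv0p h, fun _ => Or.inr hX⟩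
          · rw [if_neg hkp]
            exact hFinv k hk0 hkl
      · rw [if_neg hsent]
        refine ⟨?_, hv⟩
        have hkl : p < (v0.length : Int) := by omega
        rcases eq_or_ne (PySem.List.pyGetD v0 p 0) (-100000) with h0 | h0
        · rcases (hv.2 p hp0 hkl).2 h0 with h | h
          · exact absurd h hsent
          · exact h
        · rw [(hv.2 p hp0 hkl).1 h0, fSpec, dif_neg (by omega), if_pos h0]

lemma loopB (a v0 : List Int) (p : Int) (hp : 0 ≤ p)
    (hlen : (a.length : Int) - 1 ≤ (v0.length : Int)) :
    ∀ (m : Nat) (q : Int) (v : List Int), (q - (p - 1)).toNat = m → p - 1 ≤ q →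
      q ≤ (a.length : Int) - 2 → v.length = v0.length →
      (∀ k : Int, 0 ≤ k → k < (v0.length : Int) →
        ((q < k ∧ k ≤ (a.length : Int) - 2) → PySem.List.pyGetD v k 0 = fSpec a v0 k) ∧
        ((k ≤ q ∨ (a.length : Int) - 2 < k) → PySem.List.pyGetD v k 0 = PySem.List.pyGetD v0 k 0)) →
      ((PySem.List.pyRange q (p - 1) (-1)).foldl (stepB a) v).length = v0.length ∧
      (∀ k : Int, 0 ≤ k → k < (v0.length : Int) →
        ((p - 1 < k ∧ k ≤ (a.length : Int) - 2) →
          PySem.List.pyGetD ((PySem.List.pyRange q (p - 1) (-1)).foldl (stepB a) v) k 0 = fSpec a v0 k) ∧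
        ((k ≤ p - 1 ∨ (a.length : Int) - 2 < k) →
          PySem.List.pyGetD ((PySem.List.pyRange q (p - 1) (-1)).foldl (stepB a) v) k 0 = PySem.List.pyGetD v0 k 0)) := by
  intro m
  induction m with
  | zero =>
    intro q v hm hq1 hq2 hvl hinv
    have hq : q = p - 1 := by omega
    subst hq
    rw [PySem.List.pyRange_neg_one_eq_nil le_rfl]
    exact ⟨hvl, hinv⟩
  | succ m ih =>
    intro q v hm hq1 hq2 hvl hinv
    have hq : p - 1 < q := by omega
    have hq0 : 0 ≤ q := by omega
    have hqv0 : q < (v0.length : Int) := by omega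
    have hqv : q < (v.length : Int) := by rw [hvl]; omega
    rw [PySem.List.pyRange_neg_one_cons hq]
    simp only [List.foldl_cons]
    have hvq : PySem.List.pyGetD v q 0 = PySem.List.pyGetD v0 q 0 :=
      (hinv q hq0 hqv0).2 (Or.inl le_rfl)
    by_cases hs : PySem.List.pyGetD v0 q 0 = -100000
    · have hfq : fSpec a v0 q =
          (PySem.List.pyRange 1 (min ((a.length : Int) - q) 6) 1).foldl
            (fun c j => max c (if q + j = (a.length : Int) - 1 then PySem.List.pyGetD a (q + j) 0
              else PySem.List.pyGetD v (q + j) 0)) (-100000) + PySem.List.pyGetD a q 0 := by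
        rw [fSpec, dif_neg (by omega), if_neg (not_not_intro hs),
          foldl_attach_max _ (fun z => fSpec a v0 (q + z))]
        congr 1
        refine (PySem.List.foldl_congr_mem _ _ _ _ ?_).symm
        intro c j hj
        have hjm := PySem.List.mem_pyRange_one.mp hj
        by_cases hlastj : q + j = (a.length : Int) - 1
        · rw [if_pos hlastj, fSpec, dif_pos (by omega)]
        · rw [if_neg hlastj]
          exact congrArg _ ((hinv (q + j) (by omega) (by omega)).1 ⟨by omega, by omega⟩)
      have hstep : stepB a v q = PySem.List.pySetD v q (fSpec a v0 q) := by
        rw [stepB, if_pos (hvq ▸ hs), hfq]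
      rw [hstep]
      refine ih (q - 1) _ (by omega) (by omega) (by omega)
        (by rw [PySem.List.length_pySetD]; exact hvl) ?_
      intro k hk0 hkl
      rw [pyGetD_pySetD_int v q k _ hq0 hqv hk0]
      rcases eq_or_ne k q with rfl | hkq
      · rw [if_pos rfl]
        exact ⟨fun _ => rfl, fun h => absurd h (by omega)⟩
      · rw [if_neg hkq]
        exact ⟨fun h => (hinv k hk0 hkl).1 ⟨by omega, h.2⟩,
               fun h => (hinv k hk0 hkl).2 (by omega)⟩
    · have hfq : fSpec a v0 q = PySem.List.pyGetD v0 q 0 := by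
        rw [fSpec, dif_neg (by omega), if_pos hs]
      have hstep : stepB a v q = v := by
        rw [stepB, if_neg (hvq ▸ hs)]
      rw [hstep]
      refine ih (q - 1) v (by omega) (by omega) (by omega) hvl ?_
      intro k hk0 hkl
      rcases eq_or_ne k q with rfl | hkq
      · exact ⟨fun _ => by rw [hvq, hfq], fun h => absurd h (by omega)⟩
      · exact ⟨fun h => (hinv k hk0 hkl).1 ⟨by omega, h.2⟩,
               fun h => (hinv k hk0 hkl).2 (by omega)⟩

-- ===== VERDICT (by name: the statement is the Claim_ definition above) =====
theorem max_sum_six_distancesMem_spec : Claim_equal_max_sum_six_distancesMem := by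
  intro a p values _ hpre
  obtain ⟨hp0, hpn, hor⟩ := hpre
  unfold Spec_max_sum_six_distancesMem max_sum_six_distancesMem max_sum_six_distancesMem_alt
  by_cases hlast : p = (a.length : Int) - 1
  · rw [if_pos hlast]
    simp only [msDistMem]
    rw [if_pos hlast]
  · rw [if_neg hlast]
    have hlen : (a.length : Int) - 1 ≤ (values.length : Int) := hor.resolve_left hlast
    have hA := msA a values hlen (a.length + values.length + 2) p values hp0 hpn (by omega)
      ⟨rfl, fun k hk0 hkl => ⟨fun _ => rfl, fun h => Or.inl h⟩⟩
    have hB := loopB a values p hp0 hlen ((a.length : Int) - 2 - (p - 1)).toNat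
      ((a.length : Int) - 2) values rfl (by omega) le_rfl rfl
      (fun k hk0 hkl => ⟨fun h => absurd h (by omega), fun _ => rfl⟩)
    rw [hA.1]
    exact ((hB.2 p hp0 (by omega)).1 ⟨by omega, by omega⟩).symm
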